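-- pv_equiv track=rewrite | github.com/arifdag/TuneLeap_Music_Recognition | core/fingerprint/extractor.py | match_fingerprints
-- ===== SOURCE A (Python) =====
-- from typing import List, Tuple, Set
--
-- def match_fingerprints(query_fingerprints: List[Tuple[str, int]],
--                        stored_fingerprints: dict) -> dict:
--     """
--     Match query fingerprints against stored fingerprints.
--     Returns dict of song_id -> match_score.
--
--     stored_fingerprints format: {hash: [(song_id, time_offset), ...]}
--     """
--     # Time difference histogram for each song
--     time_diff_counts = {}
--
--     for query_hash, query_time in query_fingerprints:
--         if query_hash in stored_fingerprints:
--             # This hash matches some stored fingerprints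
--             for song_id, stored_time in stored_fingerprints[query_hash]:
--                 # Calculate time difference
--                 time_diff = stored_time - query_time
--
--                 # Create key for this song and time difference
--                 key = (song_id, time_diff)
--
--                 # Increment count
--                 if key not in time_diff_counts:
--                     time_diff_counts[key] = 0
--                 time_diff_counts[key] += 1
--
--     # Find the best match for each song
--     song_scores = {}
--     for (song_id, time_diff), count in time_diff_counts.items():
--         if song_id not in song_scores or count > song_scores[song_id]:
--             song_scores[song_id] = count
--
--     return song_scores
-- ===== SOURCE B (Python) =====
-- def match_fingerprints(query_fingerprints, stored_fingerprints):
--     """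
--     Match query fingerprints against stored fingerprints.
--     Returns dict of song_id -> match_score.
--
--     No hash histogram at all: materialize the flat list of (song_id, time_diff)
--     match events, then, the first time each song is seen, compute its score
--     directly as the largest multiplicity among its own time differences by
--     brute-force counting over the event list.
--     """
--     events = [(song_id, stored_time - query_time)
--               for query_hash, query_time in query_fingerprints
--               for song_id, stored_time in stored_fingerprints.get(query_hash, ())]
--     scores = {}
--     for song_id, _ in events:
--         if song_id not in scores:
--             diffs = [d for s, d in events if s == song_id]
--             scores[song_id] = max(diffs.count(d) for d in diffs)
--     return scores
-- ===== Notes on version B (the rewrite author's own statement) =====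
-- stated objective: alternative
-- what changed: Drops A's (song_id,time_diff)-keyed hash histogram and its separate reduction pass entirely: B materializes the flat list of match events and, on each song's first appearance, computes its score by brute-force counting the largest multiplicity among that song's time differences directly on the event list.
import Mathlib
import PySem

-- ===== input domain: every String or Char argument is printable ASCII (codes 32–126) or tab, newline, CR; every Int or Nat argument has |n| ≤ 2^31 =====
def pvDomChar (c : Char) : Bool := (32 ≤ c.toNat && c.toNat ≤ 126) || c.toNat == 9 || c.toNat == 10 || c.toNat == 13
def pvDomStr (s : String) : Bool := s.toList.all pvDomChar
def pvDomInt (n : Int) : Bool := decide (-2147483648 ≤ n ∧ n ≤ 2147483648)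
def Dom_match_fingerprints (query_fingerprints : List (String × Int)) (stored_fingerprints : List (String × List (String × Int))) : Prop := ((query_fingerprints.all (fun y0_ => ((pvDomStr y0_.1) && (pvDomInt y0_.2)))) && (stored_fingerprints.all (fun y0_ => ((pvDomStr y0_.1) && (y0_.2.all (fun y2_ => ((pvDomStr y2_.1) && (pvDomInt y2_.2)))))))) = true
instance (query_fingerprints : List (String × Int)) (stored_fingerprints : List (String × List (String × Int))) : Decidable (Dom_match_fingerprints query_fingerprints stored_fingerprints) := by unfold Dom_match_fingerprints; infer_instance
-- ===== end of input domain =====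

-- B drops A's (song_id, time_diff)-keyed hash histogram and its reduction pass entirely: it
-- materializes the flat list of match events and, on each song's first appearance, computes the
-- score by brute-force counting the largest multiplicity among that song's time differences on
-- the event list; same return value (objective: alternative decomposition, not faster).

-- ===== PORT A =====
def match_fingerprints (query_fingerprints : List (String × Int)) (stored_fingerprints : List (String × List (String × Int))) : List (String × Int) :=
  let stored : PySem.Dict String (List (String × Int)) := PySem.Dict.mk stored_fingerprints
  -- first loop: time_diff_counts[(song_id, time_diff)] += 1 over all matches
  let time_diff_counts : PySem.Dict (String × Int) Int :=
    query_fingerprints.foldl (fun tdc qp =>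
      if stored.contains qp.1 then
        -- stored[query_hash]: the key is present here, so getD returns its exact value
        (stored.getD qp.1 []).foldl (fun tdc sp =>
          let key : String × Int := (sp.1, sp.2 - qp.2)
          let tdc := if tdc.contains key then tdc else tdc.insert key 0
          -- time_diff_counts[key] += 1 (key is present, so getD reads the exact value)
          tdc.insert key (tdc.getD key 0 + 1)) tdc
      else tdc) PySem.Dict.empty
  -- second loop: best count per song over all (song_id, time_diff) entries
  let song_scores : PySem.Dict String Int :=
    time_diff_counts.items.foldl (fun ss kv =>
      -- song_scores[song_id] is only read when contains is true, so getD reads the exact value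
      if !ss.contains kv.1.1 || decide (ss.getD kv.1.1 0 < kv.2) then ss.insert kv.1.1 kv.2
      else ss) PySem.Dict.empty
  song_scores.items

-- ===== PORT B =====
def match_fingerprints_alt (query_fingerprints : List (String × Int)) (stored_fingerprints : List (String × List (String × Int))) : List (String × Int) :=
  let stored : PySem.Dict String (List (String × Int)) := PySem.Dict.mk stored_fingerprints
  -- events = [(song_id, stored_time - query_time) for ... for ...]
  let events : List (String × Int) :=
    query_fingerprints.flatMap (fun qp =>
      (stored.getD qp.1 []).map (fun sp => (sp.1, sp.2 - qp.2)))
  -- for song_id, _ in events: if song_id not in scores: brute-force-count its score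
  let scores : PySem.Dict String Int :=
    events.foldl (fun sc e =>
      if sc.contains e.1 then sc
      else
        -- diffs = [d for s, d in events if s == song_id]
        let diffs := (events.filter (fun p => p.1 == e.1)).map (·.2)
        -- max(diffs.count(d) for d in diffs); diffs is nonempty here (e ∈ events), so
        -- Python's max never raises and the .getD 0 default is unreachable
        sc.insert e.1 ((PySem.List.max? (diffs.map (fun d => (diffs.count d : Int))) id).getD 0)) PySem.Dict.empty
  scores.items

-- ===== PRECONDITION & SPEC =====
def Spec_match_fingerprints (query_fingerprints : List (String × Int)) (stored_fingerprints : List (String × List (String × Int))) (out : List (String × Int)) : Prop := out = match_fingerprints_alt query_fingerprints stored_fingerprints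
instance (query_fingerprints : List (String × Int)) (stored_fingerprints : List (String × List (String × Int))) (out : List (String × Int)) : Decidable (Spec_match_fingerprints query_fingerprints stored_fingerprints out) := by unfold Spec_match_fingerprints; infer_instance

-- ===== CLAIM (what is proved, stated in full; the proofs are below) =====
def Claim_equal_match_fingerprints : Prop := ∀ (query_fingerprints : List (String × Int)) (stored_fingerprints : List (String × List (String × Int))), Dom_match_fingerprints query_fingerprints stored_fingerprints → Spec_match_fingerprints query_fingerprints stored_fingerprints (match_fingerprints query_fingerprints stored_fingerprints)

-- ===== LEMMAS AND PROOFS =====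

-- The shared stream of (song_id, time_diff) match events, in traversal order.
def pvEvents (query_fingerprints : List (String × Int)) (stored_fingerprints : List (String × List (String × Int))) : List (String × Int) :=
  query_fingerprints.flatMap (fun qp =>
    ((PySem.Dict.mk stored_fingerprints).getD qp.1 []).map (fun sp => (sp.1, sp.2 - qp.2)))

-- strict-< running maximum, the per-song value A's second loop computes (= PySem.List.max? · id)
def pvMStep (o : Option Int) (v : Int) : Option Int :=
  match o with
  | none => some v
  | some m => if m < v then some v else some m

-- A's second-loop step, named for the lemmas below
def pvStepM (ss : PySem.Dict String Int) (kv : (String × Int) × Int) : PySem.Dict String Int :=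
  if !ss.contains kv.1.1 || decide (ss.getD kv.1.1 0 < kv.2) then ss.insert kv.1.1 kv.2 else ss

theorem pv_max?_eq_foldl (l : List Int) : PySem.List.max? l id = l.foldl pvMStep none := by
  unfold PySem.List.max? pvMStep
  congr 1
  funext o v
  cases o <;> rfl

theorem pv_foldl_pvMStep_some (l : List Int) (m : Int) :
    l.foldl pvMStep (some m) = some (l.foldl max m) := by
  induction l generalizing m with
  | nil => rfl
  | cons v t ih =>
      simp only [List.foldl_cons, pvMStep]
      rw [show (if m < v then some v else some m) = some (max m v) by
        by_cases h : m < v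
        · simp [h, max_eq_right h.le]
        · simp [h, max_eq_left (not_lt.1 h)]]
      exact ih (max m v)

theorem pv_foldl_pvMStep_eq_max? (l : List Int) : l.foldl pvMStep none = l.max? := by
  cases l with
  | nil => rfl
  | cons a t =>
      rw [List.foldl_cons, show pvMStep none a = some a from rfl, pv_foldl_pvMStep_some,
        List.max?_cons']

theorem pv_max?_congr_mem (l₁ l₂ : List Int) (h : ∀ x : Int, x ∈ l₁ ↔ x ∈ l₂) :
    l₁.max? = l₂.max? := by
  cases h1 : l₁.max? with
  | none =>
      rw [List.max?_eq_none_iff] at h1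
      subst h1
      cases h2 : l₂.max? with
      | none => rfl
      | some m =>
          have hm : m ∈ l₂ := (List.max?_eq_some_iff.1 h2).1
          exact absurd ((h m).2 hm) (List.not_mem_nil)
  | some m =>
      rcases List.max?_eq_some_iff.1 h1 with ⟨hmem, hub⟩
      exact (List.max?_eq_some_iff.2 ⟨(h m).1 hmem, fun b hb => hub b ((h b).2 hb)⟩).symm

theorem pv_foldl_flatMap {α β γ : Type} (f : γ → β → γ) (g : α → List β) (l : List α) (init : γ) :
    (l.flatMap g).foldl f init = l.foldl (fun acc x => (g x).foldl f acc) init := by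
  induction l generalizing init with
  | nil => rfl
  | cons x t ih => simp [List.flatMap_cons, List.foldl_append, ih]

-- Set.ofList commutes with filter
theorem pv_ofList_filter {α : Type} [BEq α] [LawfulBEq α] (p : α → Bool) (l : List α) :
    (PySem.Set.ofList l).filter p = PySem.Set.ofList (l.filter p) := by
  induction l using List.reverseRecOn with
  | nil => rfl
  | append_singleton t x ih =>
      rw [PySem.Set.ofList_append_singleton, List.filter_append, PySem.Set.add_eq_ite]
      by_cases hx : x ∈ PySem.Set.ofList t
      · have hxt : x ∈ t := (PySem.Set.mem_ofList t x).1 hx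
        by_cases hp : p x = true
        · have : x ∈ PySem.Set.ofList (t.filter p) :=
            (PySem.Set.mem_ofList _ x).2 (List.mem_filter.2 ⟨hxt, hp⟩)
          simp [hx, hp, ih, PySem.Set.ofList_append_singleton, PySem.Set.add_of_mem this]
        · simp at hp
          simp [hx, hp, ih]
      · have hxt : x ∉ t := fun h => hx ((PySem.Set.mem_ofList t x).2 h)
        by_cases hp : p x = true
        · have : x ∉ PySem.Set.ofList (t.filter p) := fun h =>
            hxt (List.mem_filter.1 ((PySem.Set.mem_ofList _ x).1 h)).1
          simp [hx, hp, List.filter_append, ih, PySem.Set.ofList_append_singleton,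
            PySem.Set.add_of_not_mem this]
        · simp at hp
          simp [hx, hp, List.filter_append, ih]

-- Set.ofList absorbs an inner dedup under map
theorem pv_ofList_map_ofList {α β : Type} [BEq α] [LawfulBEq α] [BEq β] [LawfulBEq β]
    (f : α → β) (l : List α) :
    PySem.Set.ofList ((PySem.Set.ofList l).map f) = PySem.Set.ofList (l.map f) := by
  induction l using List.reverseRecOn with
  | nil => rfl
  | append_singleton t x ih =>
      rw [PySem.Set.ofList_append_singleton, PySem.Set.add_eq_ite]
      by_cases hx : x ∈ PySem.Set.ofList t
      · have hfx : f x ∈ PySem.Set.ofList (t.map f) :=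
          (PySem.Set.mem_ofList _ _).2 (List.mem_map_of_mem ((PySem.Set.mem_ofList t x).1 hx))
        rw [if_pos hx, ih, List.map_append, List.map_singleton,
          PySem.Set.ofList_append_singleton, PySem.Set.add_of_mem hfx]
      · rw [if_neg hx, List.map_append, List.map_singleton, PySem.Set.ofList_append_singleton,
          List.map_append, List.map_singleton, PySem.Set.ofList_append_singleton, ih]

-- Set.ofList commutes with a map injective on the list's elements
theorem pv_ofList_map_inj {α β : Type} [BEq α] [LawfulBEq α] [BEq β] [LawfulBEq β]
    (f : α → β) (l : List α) (hinj : ∀ a ∈ l, ∀ b ∈ l, f a = f b → a = b) :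
    PySem.Set.ofList (l.map f) = (PySem.Set.ofList l).map f := by
  induction l using List.reverseRecOn with
  | nil => rfl
  | append_singleton t x ih =>
      have hinj' : ∀ a ∈ t, ∀ b ∈ t, f a = f b → a = b := fun a ha b hb =>
        hinj a (List.mem_append_left _ ha) b (List.mem_append_left _ hb)
      rw [List.map_append, List.map_singleton, PySem.Set.ofList_append_singleton,
        PySem.Set.ofList_append_singleton, ih hinj']
      by_cases hx : x ∈ PySem.Set.ofList t
      · have hfx : f x ∈ (PySem.Set.ofList t).map f := List.mem_map_of_mem hx
        rw [PySem.Set.add_of_mem hfx, PySem.Set.add_of_mem hx]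
      · have hfx : f x ∉ (PySem.Set.ofList t).map f := by
          intro h
          obtain ⟨a, ha, hfa⟩ := List.mem_map.1 h
          have hat : a ∈ t := (PySem.Set.mem_ofList t a).1 ha
          have : a = x := hinj a (List.mem_append_left _ hat)
            x (List.mem_append_right _ (List.mem_singleton.2 rfl)) hfa
          exact hx (this ▸ ha)
        rw [PySem.Set.add_of_not_mem hfx, PySem.Set.add_of_not_mem hx, List.map_append,
          List.map_singleton]

-- A's first loop is the counter of the event stream.
theorem pv_A_first_loop (q : List (String × Int)) (st : List (String × List (String × Int))) :
    q.foldl (fun tdc qp =>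
      if (PySem.Dict.mk st).contains qp.1 then
        ((PySem.Dict.mk st).getD qp.1 []).foldl (fun tdc sp =>
          let key : String × Int := (sp.1, sp.2 - qp.2)
          let tdc := if tdc.contains key then tdc else tdc.insert key 0
          tdc.insert key (tdc.getD key 0 + 1)) tdc
      else tdc) (PySem.Dict.empty : PySem.Dict (String × Int) Int)
    = PySem.Dict.counter (pvEvents q st) := by
  have hstep : ∀ (tdc : PySem.Dict (String × Int) Int) (key : String × Int),
      (let t1 := if tdc.contains key then tdc else tdc.insert key 0
       t1.insert key (t1.getD key 0 + 1)) = tdc.insert key (tdc.getD key 0 + 1) := by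
    intro tdc key
    by_cases hc : tdc.contains key = true
    · simp [hc]
    · simp only [Bool.not_eq_true] at hc
      simp [hc, PySem.Dict.getD_insert_self, PySem.Dict.insert_insert_self,
        PySem.Dict.getD_of_not_contains _ _ hc]
  have houter : (fun (tdc : PySem.Dict (String × Int) Int) (qp : String × Int) =>
      if (PySem.Dict.mk st).contains qp.1 then
        ((PySem.Dict.mk st).getD qp.1 []).foldl (fun tdc sp =>
          let key : String × Int := (sp.1, sp.2 - qp.2)
          let tdc := if tdc.contains key then tdc else tdc.insert key 0
          tdc.insert key (tdc.getD key 0 + 1)) tdc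
      else tdc)
    = (fun tdc qp =>
        (((PySem.Dict.mk st).getD qp.1 []).map (fun sp => (sp.1, sp.2 - qp.2))).foldl
          (fun d k => d.insert k (d.getD k 0 + 1)) tdc) := by
    funext tdc qp
    by_cases hc : (PySem.Dict.mk st).contains qp.1 = true
    · rw [if_pos hc, List.foldl_map]
      congr 1
      funext d sp
      exact hstep d (sp.1, sp.2 - qp.2)
    · simp only [Bool.not_eq_true] at hc
      rw [if_neg (by simp [hc]), PySem.Dict.getD_of_not_contains _ _ hc]
      rfl
  rw [houter, ← pv_foldl_flatMap]
  exact PySem.Dict.foldl_insert_getD_add_one_eq_counter _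

theorem pv_stepM_get? (d : PySem.Dict String Int) (p : (String × Int) × Int) (s : String) :
    (pvStepM d p).get? s = if p.1.1 = s then pvMStep (d.get? s) p.2 else d.get? s := by
  unfold pvStepM pvMStep
  by_cases h : p.1.1 = s
  · subst h
    cases hg : d.get? p.1.1 with
    | none =>
        have hc : d.contains p.1.1 = false := by
          rw [PySem.Dict.contains_eq_isSome_get?, hg]; rfl
        simp [hc, PySem.Dict.get?_insert_self]
    | some m =>
        have hc : d.contains p.1.1 = true := by
          rw [PySem.Dict.contains_eq_isSome_get?, hg]; rfl
        have hgd : d.getD p.1.1 0 = m := PySem.Dict.getD_of_get?_eq_some d 0 hg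
        by_cases hlt : m < p.2
        · simp [hc, hgd, hlt, PySem.Dict.get?_insert_self]
        · simp [hc, hgd, hlt, hg]
  · by_cases hcond : (!d.contains p.1.1 || decide (d.getD p.1.1 0 < p.2)) = true
    · simp [hcond, h, PySem.Dict.get?_insert_of_ne d _ (fun hh => h hh.symm)]
    · simp only [hcond, Bool.false_eq_true, if_false, h]

theorem pv_maxfold_get? (P : List ((String × Int) × Int)) (d : PySem.Dict String Int) (s : String) :
    (P.foldl pvStepM d).get? s
      = ((P.filter (fun p => p.1.1 == s)).map (·.2)).foldl pvMStep (d.get? s) := by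
  induction P generalizing d with
  | nil => rfl
  | cons p t ih =>
      simp only [List.foldl_cons, ih, List.filter_cons]
      by_cases h : p.1.1 = s
      · simp [h, pv_stepM_get? d p s]
      · simp [h, pv_stepM_get? d p s, beq_iff_eq]

theorem pv_maxfold_keys (P : List ((String × Int) × Int)) (d : PySem.Dict String Int) :
    (P.foldl pvStepM d).keys = PySem.Set.update d.keys (P.map (·.1.1)) := by
  induction P generalizing d with
  | nil => rfl
  | cons p t ih =>
      rw [List.foldl_cons, ih, List.map_cons, PySem.Set.update_cons]
      congr 1
      unfold pvStepM
      by_cases hc : d.contains p.1.1 = true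
      · have hm : p.1.1 ∈ d.keys := (PySem.Dict.contains_iff_mem_keys d p.1.1).1 hc
        by_cases hlt : d.getD p.1.1 0 < p.2
        · simp [hc, hlt, PySem.Dict.keys_insert_of_contains d _ hc, PySem.Set.add_of_mem hm]
        · simp [hc, hlt, PySem.Set.add_of_mem hm]
      · simp only [Bool.not_eq_true] at hc
        have hm : p.1.1 ∉ d.keys := fun h => by
          rw [(PySem.Dict.contains_iff_mem_keys d p.1.1).2 h] at hc; cases hc
        simp [hc, PySem.Dict.keys_insert_of_not_contains d _ hc, PySem.Set.add_of_not_mem hm]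

theorem pv_maxfold_nodup (P : List ((String × Int) × Int)) (d : PySem.Dict String Int)
    (h : d.keys.Nodup) : (P.foldl pvStepM d).keys.Nodup := by
  induction P generalizing d with
  | nil => exact h
  | cons p t ih =>
      rw [List.foldl_cons]
      apply ih
      unfold pvStepM
      split
      · exact PySem.Dict.nodup_keys_insert d _ _ h
      · exact h

-- the per-song lists of candidate scores coincide on the two sides (as counter values)
theorem pv_counts_eq (ev : List (String × Int)) (s : String) :
    ((PySem.Set.ofList ev).filter (fun k => k.1 == s)).map (fun k => (ev.count k : Int))
      = (PySem.Dict.counter ((ev.filter (fun e => e.1 == s)).map (·.2))).values := by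
  have hfst : ∀ k ∈ ev.filter (fun e => e.1 == s), k.1 = s := by
    intro k hk
    exact beq_iff_eq.1 (List.mem_filter.1 hk).2
  have hinj : ∀ a ∈ ev.filter (fun e => e.1 == s), ∀ b ∈ ev.filter (fun e => e.1 == s),
      a.2 = b.2 → a = b := by
    intro a ha b hb h2
    exact Prod.ext ((hfst a ha).trans (hfst b hb).symm) h2
  have hvals : (PySem.Dict.counter ((ev.filter (fun e => e.1 == s)).map (·.2))).values
      = ((PySem.Set.ofList ((ev.filter (fun e => e.1 == s)).map (·.2))).map
          (fun d => ((((ev.filter (fun e => e.1 == s)).map (·.2)).count d : Int)))) := by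
    show ((PySem.Dict.counter _).items).map (·.2) = _
    rw [PySem.Dict.items_counter]
    simp [List.map_map, Function.comp]
  rw [hvals, pv_ofList_map_inj _ _ hinj, List.map_map, pv_ofList_filter]
  apply List.map_congr_left
  intro k hk
  have hkmem : k ∈ ev.filter (fun e => e.1 == s) := (PySem.Set.mem_ofList _ k).1 hk
  have hk1 : k.1 = s := hfst k hkmem
  have h1 : ev.count k = (ev.filter (fun e => e.1 == s)).count k :=
    (List.count_filter (by simp [hk1])).symm
  have h2 : (ev.filter (fun e => e.1 == s)).count k
      = ((ev.filter (fun e => e.1 == s)).map (·.2)).count k.2 := by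
    rw [List.count, List.count, List.countP_map]
    apply List.countP_congr
    intro x hx
    have hx1 : x.1 = s := hfst x hx
    constructor
    · intro h; simp only [beq_iff_eq] at h ⊢; simp [Function.comp, h]
    · intro h
      simp only [Function.comp, beq_iff_eq] at h
      simp only [beq_iff_eq]
      exact Prod.ext (hx1.trans hk1.symm) h
  simp only [Function.comp]
  rw [h1, h2]

-- counter values and the raw per-element counts have the same members (dedup keeps the set)
theorem pv_counter_values_mem (l : List Int) (x : Int) :
    x ∈ (PySem.Dict.counter l).values ↔ x ∈ l.map (fun d => (l.count d : Int)) := by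
  show x ∈ ((PySem.Dict.counter l).items).map (·.2) ↔ _
  rw [PySem.Dict.items_counter, List.map_map]
  simp only [List.mem_map, Function.comp]
  exact ⟨fun ⟨d, hd, hx⟩ => ⟨d, (PySem.Set.mem_ofList l d).1 hd, hx⟩,
    fun ⟨d, hd, hx⟩ => ⟨d, (PySem.Set.mem_ofList l d).2 hd, hx⟩⟩

-- A, in canonical form: one entry per song (in first-match order), value = running max of counts
theorem match_fingerprints_eq_canon (q : List (String × Int)) (st : List (String × List (String × Int))) :
    match_fingerprints q st
      = (PySem.Set.ofList ((pvEvents q st).map (·.1))).map (fun s =>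
          (s, ((((PySem.Set.ofList (pvEvents q st)).filter (fun k => k.1 == s)).map
                  (fun k => ((pvEvents q st).count k : Int))).foldl pvMStep none).getD 0)) := by
  unfold match_fingerprints
  simp only []
  rw [pv_A_first_loop q st]
  set ev := pvEvents q st with hev
  set P := (PySem.Dict.counter ev).items with hP
  have hfold : P.foldl (fun ss kv =>
      if !ss.contains kv.1.1 || decide (ss.getD kv.1.1 0 < kv.2) then ss.insert kv.1.1 kv.2
      else ss) PySem.Dict.empty = P.foldl pvStepM PySem.Dict.empty := rfl
  rw [hfold]
  set D := P.foldl pvStepM PySem.Dict.empty with hD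
  have hnodup : D.keys.Nodup := by
    apply pv_maxfold_nodup
    rw [PySem.Dict.keys_empty]
    exact List.nodup_nil
  rw [PySem.Dict.items_eq_map_keys D hnodup 0]
  have hkeys : D.keys = PySem.Set.ofList (ev.map (·.1)) := by
    rw [hD, pv_maxfold_keys, PySem.Dict.keys_empty, hP, PySem.Dict.items_counter, List.map_map]
    show PySem.Set.update [] ((PySem.Set.ofList ev).map (·.1)) = _
    rw [show (PySem.Set.update [] ((PySem.Set.ofList ev).map (·.1)) : List String)
        = PySem.Set.ofList ((PySem.Set.ofList ev).map (·.1)) from rfl]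
    exact pv_ofList_map_ofList _ _
  rw [hkeys]
  apply List.map_congr_left
  intro s _
  congr 1
  rw [PySem.Dict.getD_eq_get?_getD, hD, pv_maxfold_get?, PySem.Dict.get?_empty, hP,
    PySem.Dict.items_counter, List.filter_map, List.map_map]
  congr 1

-- B's fold: skip-if-seen insertion of a key-determined value = map over the deduped key list
theorem pv_skipfold_get? (f : String → Int) (l : List (String × Int))
    (d : PySem.Dict String Int) (s : String) :
    (l.foldl (fun sc e => if sc.contains e.1 then sc else sc.insert e.1 (f e.1)) d).get? s
      = if d.contains s then d.get? s
        else if s ∈ l.map (·.1) then some (f s) else none := by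
  induction l generalizing d with
  | nil =>
      by_cases hc : d.contains s = true
      · simp [hc]
      · have hg : d.get? s = none := by
          have h := PySem.Dict.contains_eq_isSome_get? d s
          rw [Bool.not_eq_true] at hc
          rw [hc] at h
          cases hgg : d.get? s with
          | none => rfl
          | some v => rw [hgg] at h; simp at h
        simp [hc, hg]
  | cons e t ih =>
      rw [List.foldl_cons, List.map_cons]
      by_cases hse : s = e.1
      · by_cases hce : d.contains e.1 = true
        · rw [if_pos hce, ih, hse, if_pos hce, if_pos hce]
        · rw [if_neg hce, ih]
          have hc2 : (d.insert e.1 (f e.1)).contains s = true := by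
            rw [PySem.Dict.contains_insert]; simp [hse]
          rw [if_pos hc2, hse, if_neg hce, PySem.Dict.get?_insert_self]
          simp
      · have hmem : (s ∈ e.1 :: t.map (·.1)) = (s ∈ t.map (·.1)) := by
          simp [List.mem_cons, hse]
        by_cases hce : d.contains e.1 = true
        · rw [if_pos hce, ih]
          simp only [hmem]
        · rw [if_neg hce, ih]
          have h1 : (d.insert e.1 (f e.1)).contains s = d.contains s := by
            rw [PySem.Dict.contains_insert]; simp [hse]
          rw [h1, PySem.Dict.get?_insert_of_ne d _ hse]
          simp only [hmem]

theorem pv_skipfold_keys (f : String → Int) (l : List (String × Int)) (d : PySem.Dict String Int) :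
    (l.foldl (fun sc e => if sc.contains e.1 then sc else sc.insert e.1 (f e.1)) d).keys
      = PySem.Set.update d.keys (l.map (·.1)) := by
  induction l generalizing d with
  | nil => rfl
  | cons e t ih =>
      rw [List.foldl_cons, ih, List.map_cons, PySem.Set.update_cons]
      congr 1
      by_cases hc : d.contains e.1 = true
      · have hm : e.1 ∈ d.keys := (PySem.Dict.contains_iff_mem_keys d e.1).1 hc
        simp [hc, PySem.Set.add_of_mem hm]
      · simp only [Bool.not_eq_true] at hc
        have hm : e.1 ∉ d.keys := fun h => by
          rw [(PySem.Dict.contains_iff_mem_keys d e.1).2 h] at hc; cases hc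
        simp [hc, PySem.Dict.keys_insert_of_not_contains d _ hc, PySem.Set.add_of_not_mem hm]

theorem pv_skipfold_nodup (f : String → Int) (l : List (String × Int)) (d : PySem.Dict String Int)
    (h : d.keys.Nodup) :
    (l.foldl (fun sc e => if sc.contains e.1 then sc else sc.insert e.1 (f e.1)) d).keys.Nodup := by
  induction l generalizing d with
  | nil => exact h
  | cons e t ih =>
      rw [List.foldl_cons]
      apply ih
      split
      · exact h
      · exact PySem.Dict.nodup_keys_insert d _ _ h

-- The per-song score B computes: max multiplicity among the song's time differences
def pvScore (ev : List (String × Int)) (s : String) : Int :=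
  let diffs := (ev.filter (fun p => p.1 == s)).map (·.2)
  (PySem.List.max? (diffs.map (fun d => (diffs.count d : Int))) id).getD 0

-- B's whole body, for an arbitrary event list: skip-if-seen fold = map over the deduped songs
theorem pv_B_fold (ev : List (String × Int)) :
    (ev.foldl (fun sc e =>
        if sc.contains e.1 then sc
        else
          let diffs := (ev.filter (fun p => p.1 == e.1)).map (·.2)
          sc.insert e.1 ((PySem.List.max? (diffs.map (fun d => (diffs.count d : Int))) id).getD 0))
      PySem.Dict.empty).items
    = (PySem.Set.ofList (ev.map (·.1))).map (fun s => (s, pvScore ev s)) := by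
  have hfoldeq : ev.foldl (fun sc e =>
      if sc.contains e.1 then sc
      else
        let diffs := (ev.filter (fun p => p.1 == e.1)).map (·.2)
        sc.insert e.1 ((PySem.List.max? (diffs.map (fun d => (diffs.count d : Int))) id).getD 0))
      PySem.Dict.empty
    = ev.foldl (fun sc e => if sc.contains e.1 then sc else sc.insert e.1 (pvScore ev e.1))
      PySem.Dict.empty := rfl
  rw [hfoldeq]
  set D := ev.foldl (fun sc e => if sc.contains e.1 then sc else sc.insert e.1 (pvScore ev e.1))
    PySem.Dict.empty with hD
  have hnodup : D.keys.Nodup := by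
    apply pv_skipfold_nodup
    rw [PySem.Dict.keys_empty]
    exact List.nodup_nil
  rw [PySem.Dict.items_eq_map_keys D hnodup 0]
  have hkeys : D.keys = PySem.Set.ofList (ev.map (·.1)) := by
    rw [hD, pv_skipfold_keys, PySem.Dict.keys_empty]
    rfl
  rw [hkeys]
  apply List.map_congr_left
  intro s hs
  have hsmem : s ∈ ev.map (·.1) := (PySem.Set.mem_ofList _ s).1 hs
  congr 1
  rw [PySem.Dict.getD_eq_get?_getD, hD, pv_skipfold_get?, PySem.Dict.contains_empty]
  simp [hsmem]

-- B, in canonical form (definitional instance of pv_B_fold at ev = pvEvents q st)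
theorem match_fingerprints_alt_eq_canon (q : List (String × Int)) (st : List (String × List (String × Int))) :
    match_fingerprints_alt q st
      = (PySem.Set.ofList ((pvEvents q st).map (·.1))).map (fun s =>
          (s, pvScore (pvEvents q st) s)) :=
  pv_B_fold (pvEvents q st)

-- ===== VERDICT (by name: the statement is the Claim_ definition above) =====
theorem match_fingerprints_spec : Claim_equal_match_fingerprints := by
  intro q st _
  unfold Spec_match_fingerprints
  rw [match_fingerprints_eq_canon, match_fingerprints_alt_eq_canon]
  refine List.map_congr_left (fun s _ => ?_)
  congr 1
  simp only [pvScore]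
  rw [pv_counts_eq, pv_max?_eq_foldl, pv_foldl_pvMStep_eq_max?, pv_foldl_pvMStep_eq_max?,
    pv_max?_congr_mem _ _ (fun x => pv_counter_values_mem _ x)]
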